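-- pv_equiv track=rewrite | github.com/bruhismyname/Praktikum-ASA-D2 | Pertemuan 4/akuIngin.py | koefisien_ketidakbahagiaan_minimum
-- ===== SOURCE A (Python) =====
-- def koefisien_ketidakbahagiaan_minimum(n, k, kuda):
--     jumlah_hitam = [0] * k
--     jumlah_putih = [0] * k
--
--     for i in range(n):
--         indeks_kandang = i % k
--         if kuda[i] == 1:
--             jumlah_hitam[indeks_kandang] += 1
--         else:
--             jumlah_putih[indeks_kandang] += 1
--
--     total_ketidakbahagiaan = 0
--     for i in range(k):
--         total_ketidakbahagiaan += jumlah_hitam[i] * jumlah_putih[i]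
--
--     return total_ketidakbahagiaan
-- ===== SOURCE B (Python) =====
-- def koefisien_ketidakbahagiaan_minimum(n, k, kuda):
--     # Online pair counting: each horse contributes one unhappy pair with every
--     # previously seen opposite-colour horse in its stable (group i % k), so the
--     # answer accumulates in the single pass and no tally-product step exists.
--     total = 0
--     hitam_terlihat = [0] * k
--     putih_terlihat = [0] * k
--     for i in range(n):
--         g = i % k
--         if kuda[i] == 1:
--             total += putih_terlihat[g]
--             hitam_terlihat[g] += 1
--         else:
--             total += hitam_terlihat[g]
--             putih_terlihat[g] += 1
--     return total
-- ===== Notes on version B (the rewrite author's own statement) =====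
-- stated objective: alternative
-- what changed: B counts unhappy pairs online in a single pass -- each horse adds the number of previously seen opposite-colour horses in its group to the running total -- instead of A's scheme of tallying black and white counts first and then multiplying them per group in a second loop over k.
import Mathlib
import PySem

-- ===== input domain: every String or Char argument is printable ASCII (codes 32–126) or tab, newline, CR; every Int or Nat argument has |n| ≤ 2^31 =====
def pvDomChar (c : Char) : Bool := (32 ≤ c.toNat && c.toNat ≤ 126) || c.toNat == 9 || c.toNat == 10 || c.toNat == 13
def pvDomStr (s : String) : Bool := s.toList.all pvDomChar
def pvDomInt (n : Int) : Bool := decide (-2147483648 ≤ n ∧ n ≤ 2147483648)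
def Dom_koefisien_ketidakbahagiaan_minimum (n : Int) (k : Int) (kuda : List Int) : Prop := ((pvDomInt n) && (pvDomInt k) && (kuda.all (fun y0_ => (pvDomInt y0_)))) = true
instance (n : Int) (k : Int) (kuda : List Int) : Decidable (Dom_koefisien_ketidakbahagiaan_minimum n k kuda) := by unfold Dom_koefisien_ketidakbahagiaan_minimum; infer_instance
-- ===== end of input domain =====

-- B counts unhappy pairs online in one pass (each horse pairs with previously seen
-- opposite-colour horses in its group) instead of A's tally-then-multiply two-loop scheme.

-- ===== PORT A =====
def koefisien_ketidakbahagiaan_minimum (n : Int) (k : Int) (kuda : List Int) : Int :=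
  let jumlah_hitam := List.replicate k.toNat (0 : Int)
  let jumlah_putih := List.replicate k.toNat (0 : Int)
  let st := (PySem.List.pyRange 0 n 1).foldl
    (fun (st : List Int × List Int) i =>
      let indeks_kandang := PySem.Int.mod i k
      if PySem.List.pyGetD kuda i 0 = 1 then
        (PySem.List.pySetD st.1 indeks_kandang (PySem.List.pyGetD st.1 indeks_kandang 0 + 1), st.2)
      else
        (st.1, PySem.List.pySetD st.2 indeks_kandang (PySem.List.pyGetD st.2 indeks_kandang 0 + 1)))
    (jumlah_hitam, jumlah_putih)
  (PySem.List.pyRange 0 k 1).foldl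
    (fun total i => total + PySem.List.pyGetD st.1 i 0 * PySem.List.pyGetD st.2 i 0) 0

-- ===== PORT B =====
def koefisien_ketidakbahagiaan_minimum_alt (n : Int) (k : Int) (kuda : List Int) : Int :=
  let st := (PySem.List.pyRange 0 n 1).foldl
    (fun (st : Int × List Int × List Int) i =>
      let g := PySem.Int.mod i k
      if PySem.List.pyGetD kuda i 0 = 1 then
        (st.1 + PySem.List.pyGetD st.2.2 g 0,
         PySem.List.pySetD st.2.1 g (PySem.List.pyGetD st.2.1 g 0 + 1),
         st.2.2)
      else
        (st.1 + PySem.List.pyGetD st.2.1 g 0,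
         st.2.1,
         PySem.List.pySetD st.2.2 g (PySem.List.pyGetD st.2.2 g 0 + 1)))
    (0, List.replicate k.toNat (0 : Int), List.replicate k.toNat (0 : Int))
  st.1

-- ===== PRECONDITION & SPEC =====
-- Pre_ excludes exactly the inputs where Python A raises: n > 0 with k ≤ 0
-- (ZeroDivisionError / IndexError on the empty tally lists) or with kuda shorter than n (IndexError).
def Pre_koefisien_ketidakbahagiaan_minimum (n : Int) (k : Int) (kuda : List Int) : Prop :=
  0 < n → (0 < k ∧ n ≤ (kuda.length : Int))
instance (n : Int) (k : Int) (kuda : List Int) : Decidable (Pre_koefisien_ketidakbahagiaan_minimum n k kuda) := by unfold Pre_koefisien_ketidakbahagiaan_minimum; infer_instance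
def pvWitness_koefisien_ketidakbahagiaan_minimum : Int × Int × List Int := (4, 2, [1, 0, 1, 1])
def Spec_koefisien_ketidakbahagiaan_minimum (n : Int) (k : Int) (kuda : List Int) (out : Int) : Prop := out = koefisien_ketidakbahagiaan_minimum_alt n k kuda
instance (n : Int) (k : Int) (kuda : List Int) (out : Int) : Decidable (Spec_koefisien_ketidakbahagiaan_minimum n k kuda out) := by unfold Spec_koefisien_ketidakbahagiaan_minimum; infer_instance

-- ===== CLAIM (what is proved, stated in full; the proofs are below) =====
def Claim_equal_koefisien_ketidakbahagiaan_minimum : Prop := ∀ (n : Int) (k : Int) (kuda : List Int), Dom_koefisien_ketidakbahagiaan_minimum n k kuda → Pre_koefisien_ketidakbahagiaan_minimum n k kuda → Spec_koefisien_ketidakbahagiaan_minimum n k kuda (koefisien_ketidakbahagiaan_minimum n k kuda)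

-- ===== LEMMAS AND PROOFS =====

/-- One tally step: bump slot `j % k'` when `cond j` holds. -/
def pvTallyF (k' : Nat) (cond : Nat → Bool) (h : List Int) (j : Nat) : List Int :=
  if cond j then h.set (j % k') (h.getD (j % k') 0 + 1) else h

/-- The tally of `{j < m | cond j}` into `k'` buckets by `j % k'`. -/
def pvTally (k' : Nat) (cond : Nat → Bool) (m : Nat) : List Int :=
  (List.range m).foldl (pvTallyF k' cond) (List.replicate k' 0)

/-- One step of B's online pair count over abstract state (total, black, white). -/
def pvStepB (k' : Nat) (cond : Nat → Bool) (st : Int × List Int × List Int) (j : Nat) :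
    Int × List Int × List Int :=
  if cond j then
    (st.1 + st.2.2.getD (j % k') 0, st.2.1.set (j % k') (st.2.1.getD (j % k') 0 + 1), st.2.2)
  else
    (st.1 + st.2.1.getD (j % k') 0, st.2.1, st.2.2.set (j % k') (st.2.2.getD (j % k') 0 + 1))

/-- The sum A's second loop computes. -/
def pvSum (k' : Nat) (h w : List Int) : Int :=
  ∑ j ∈ Finset.range k', h.getD j 0 * w.getD j 0

lemma pvFold_len (k' : Nat) (cond : Nat → Bool) :
    ∀ (l : List Nat) (h : List Int), (l.foldl (pvTallyF k' cond) h).length = h.length := by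
  intro l
  induction l with
  | nil => intro h; rfl
  | cons x xs ih =>
    intro h
    simp only [List.foldl_cons]
    rw [ih]
    unfold pvTallyF
    split <;> simp

lemma pvTally_len (k' : Nat) (cond : Nat → Bool) (m : Nat) : (pvTally k' cond m).length = k' := by
  unfold pvTally; rw [pvFold_len]; simp

lemma pvGetD_set_ne (h : List Int) (g j : Nat) (x : Int) (hne : j ≠ g) :
    (h.set g x).getD j 0 = h.getD j 0 := by
  rw [List.getD_eq_getElem?_getD, List.getD_eq_getElem?_getD, List.getElem?_set,
    if_neg (fun hgj => hne hgj.symm)]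

lemma pvGetD_set_self (h : List Int) (g : Nat) (x : Int) (hg : g < h.length) :
    (h.set g x).getD g 0 = x := by
  rw [List.getD_eq_getElem?_getD, List.getElem?_set, if_pos rfl, if_pos hg]
  rfl

lemma pvSum_set_left (k' : Nat) (h w : List Int) (g : Nat) (hg : g < k') (hlen : h.length = k') :
    pvSum k' (h.set g (h.getD g 0 + 1)) w = pvSum k' h w + w.getD g 0 := by
  unfold pvSum
  have hmem : g ∈ Finset.range k' := Finset.mem_range.mpr hg
  rw [← Finset.add_sum_erase _ _ hmem, ← Finset.add_sum_erase _ _ hmem,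
    pvGetD_set_self h g _ (by omega)]
  have herase : ∀ j ∈ (Finset.range k').erase g,
      (h.set g (h.getD g 0 + 1)).getD j 0 * w.getD j 0 = h.getD j 0 * w.getD j 0 := by
    intro j hj
    rw [pvGetD_set_ne h g j _ (Finset.ne_of_mem_erase hj)]
  rw [Finset.sum_congr rfl herase]
  ring

lemma pvSum_set_right (k' : Nat) (h w : List Int) (g : Nat) (hg : g < k') (hlen : w.length = k') :
    pvSum k' h (w.set g (w.getD g 0 + 1)) = pvSum k' h w + h.getD g 0 := by
  unfold pvSum
  have hmem : g ∈ Finset.range k' := Finset.mem_range.mpr hg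
  rw [← Finset.add_sum_erase _ _ hmem, ← Finset.add_sum_erase _ _ hmem,
    pvGetD_set_self w g _ (by omega)]
  have herase : ∀ j ∈ (Finset.range k').erase g,
      h.getD j 0 * (w.set g (w.getD g 0 + 1)).getD j 0 = h.getD j 0 * w.getD j 0 := by
    intro j hj
    rw [pvGetD_set_ne w g j _ (Finset.ne_of_mem_erase hj)]
  rw [Finset.sum_congr rfl herase]
  ring

/-- B's loop invariant: the running total is always the pair count of the tallies so far. -/
lemma pvB_inv (k' : Nat) (hk : 0 < k') (cond : Nat → Bool) :
    ∀ m, (List.range m).foldl (pvStepB k' cond)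
        (0, List.replicate k' 0, List.replicate k' 0)
      = (pvSum k' (pvTally k' cond m) (pvTally k' (fun j => !cond j) m),
         pvTally k' cond m, pvTally k' (fun j => !cond j) m) := by
  intro m
  induction m with
  | zero => simp [pvTally, pvSum]
  | succ m ih =>
    have hTB : pvTally k' cond (m + 1) = pvTallyF k' cond (pvTally k' cond m) m := by
      unfold pvTally
      rw [List.range_succ, List.foldl_append, List.foldl_cons, List.foldl_nil]
    have hTW : pvTally k' (fun j => !cond j) (m + 1)
        = pvTallyF k' (fun j => !cond j) (pvTally k' (fun j => !cond j) m) m := by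
      unfold pvTally
      rw [List.range_succ, List.foldl_append, List.foldl_cons, List.foldl_nil]
    have hmod : m % k' < k' := Nat.mod_lt _ hk
    rw [List.range_succ, List.foldl_append, List.foldl_cons, List.foldl_nil, ih, hTB, hTW]
    unfold pvStepB pvTallyF
    cases hc : cond m
    · simp only [hc, Bool.not_false, Bool.false_eq_true, if_false, if_true]
      rw [pvSum_set_right k' _ _ _ hmod (pvTally_len k' (fun j => !cond j) m)]
    · simp only [hc, Bool.not_true, Bool.false_eq_true, if_false, if_true]
      rw [pvSum_set_left k' _ _ _ hmod (pvTally_len k' cond m)]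

lemma pvListSum (f : Nat → Int) : ∀ m, ((List.range m).map f).sum = ∑ j ∈ Finset.range m, f j := by
  intro m
  induction m with
  | zero => simp
  | succ m ih => rw [List.range_succ, Finset.sum_range_succ, List.map_append, List.sum_append, ih]; simp

lemma pv_main (n k : Int) (kuda : List Int)
    (hpre : Pre_koefisien_ketidakbahagiaan_minimum n k kuda) :
    koefisien_ketidakbahagiaan_minimum n k kuda = koefisien_ketidakbahagiaan_minimum_alt n k kuda := by
  by_cases hk : k ≤ 0
  · -- k ≤ 0: Pre_ forces n ≤ 0, so both loops are empty and both programs return 0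
    have hn : n ≤ 0 := by
      by_contra hc
      exact absurd (hpre (by omega)).1 (by omega)
    simp [koefisien_ketidakbahagiaan_minimum, koefisien_ketidakbahagiaan_minimum_alt,
      PySem.List.pyRange_one_eq_nil (by omega : n ≤ 0),
      PySem.List.pyRange_one_eq_nil (by omega : k ≤ 0)]
  · -- k > 0
    replace hk : 0 < k := by omega
    have hkk : k = (k.toNat : Int) := by omega
    set k' := k.toNat with hk'
    set condB : Nat → Bool := fun j => decide (kuda.getD j 0 = 1) with hcondB
    set condW : Nat → Bool := fun j => !condB j with hcondW
    simp only [koefisien_ketidakbahagiaan_minimum, koefisien_ketidakbahagiaan_minimum_alt,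
      PySem.List.pyRange_zero, List.foldl_map]
    -- A's first loop is the pair of tallies
    have hA :
        (List.range n.toNat).foldl
          (fun (st : List Int × List Int) (j : Nat) =>
            let indeks_kandang := PySem.Int.mod (j : Int) k
            if PySem.List.pyGetD kuda (j : Int) 0 = 1 then
              (PySem.List.pySetD st.1 indeks_kandang (PySem.List.pyGetD st.1 indeks_kandang 0 + 1), st.2)
            else
              (st.1, PySem.List.pySetD st.2 indeks_kandang (PySem.List.pyGetD st.2 indeks_kandang 0 + 1)))
          (List.replicate k' 0, List.replicate k' 0)
        = (pvTally k' condB n.toNat, pvTally k' condW n.toNat) := by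
      simp only [pvTally]
      rw [← PySem.List.foldl_prod_mk (pvTallyF k' condB) (pvTallyF k' condW)]
      apply PySem.List.foldl_congr_mem
      intro st j _
      simp only [hkk, PySem.Int.mod_natCast, PySem.List.pyGetD_natCast,
        PySem.List.pySetD_natCast, pvTallyF, hcondB, hcondW]
      by_cases hc : kuda[j]?.getD 0 = 1 <;> simp [hc]
    -- B's loop is the abstract online pair-count loop
    have hB :
        (List.range n.toNat).foldl
          (fun (st : Int × List Int × List Int) (j : Nat) =>
            let g := PySem.Int.mod (j : Int) k
            if PySem.List.pyGetD kuda (j : Int) 0 = 1 then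
              (st.1 + PySem.List.pyGetD st.2.2 g 0,
               PySem.List.pySetD st.2.1 g (PySem.List.pyGetD st.2.1 g 0 + 1),
               st.2.2)
            else
              (st.1 + PySem.List.pyGetD st.2.1 g 0,
               st.2.1,
               PySem.List.pySetD st.2.2 g (PySem.List.pyGetD st.2.2 g 0 + 1)))
          (0, List.replicate k' 0, List.replicate k' 0)
        = (List.range n.toNat).foldl (pvStepB k' condB)
            (0, List.replicate k' 0, List.replicate k' 0) := by
      apply PySem.List.foldl_congr_mem
      intro st j _
      simp only [hkk, PySem.Int.mod_natCast, PySem.List.pyGetD_natCast,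
        PySem.List.pySetD_natCast, pvStepB, hcondB]
      by_cases hc : kuda[j]?.getD 0 = 1 <;> simp [hc]
    rw [hA, hB, pvB_inv k' (by omega) condB n.toNat]
    -- A's second loop computes the same sum
    rw [PySem.List.foldl_add]
    simp only [← hk', PySem.List.pyGetD_natCast, zero_add]
    rw [pvListSum]
    rfl

-- ===== VERDICT (by name: the statement is the Claim_ definition above) =====
theorem koefisien_ketidakbahagiaan_minimum_spec : Claim_equal_koefisien_ketidakbahagiaan_minimum := by
  intro n k kuda _ hpre
  unfold Spec_koefisien_ketidakbahagiaan_minimum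
  exact pv_main n k kuda hpre
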